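-- pv_equiv track=rewrite | github.com/P-fury/500_functions | 500_funk.py | mumble_creator
-- ===== SOURCE A (Python) =====
-- def mumble_creator(text):
--     new_str = ''
--     for i in range(len(text) - 1):
--         if text[i] == text[i + 1]:
--             pass
--         else:
--             new_str += text[i] + text[i]
--     new_str += text[-1] + text[-1]
--     return new_str
-- ===== SOURCE B (Python) =====
-- def mumble_creator(text):
--     res = []
--     i = 0
--     n = len(text)
--     while i < n:
--         res.append(text[i] * 2)
--         j = i + 1
--         while j < n and text[j] == text[i]:
--             j += 1
--         i = j
--     return ''.join(res)
-- ===== Notes on version B (the rewrite author's own statement) =====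
-- stated objective: alternative
-- what changed: Replaces the per-index lookahead comparison plus separate final-character append with a run-skipping two-pointer loop that emits each maximal run's first character doubled.
import Mathlib
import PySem

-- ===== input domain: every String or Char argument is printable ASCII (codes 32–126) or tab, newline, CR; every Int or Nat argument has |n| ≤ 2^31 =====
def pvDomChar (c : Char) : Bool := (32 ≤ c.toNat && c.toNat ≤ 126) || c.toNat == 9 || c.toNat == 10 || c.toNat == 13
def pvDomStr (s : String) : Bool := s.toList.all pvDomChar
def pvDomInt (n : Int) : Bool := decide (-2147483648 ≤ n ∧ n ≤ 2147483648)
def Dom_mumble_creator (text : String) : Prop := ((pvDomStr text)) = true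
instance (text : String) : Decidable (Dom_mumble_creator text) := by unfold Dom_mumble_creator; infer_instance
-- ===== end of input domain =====

-- B replaces A's per-index lookahead loop (+ separate final append) with a run-skipping
-- two-pointer scan emitting each maximal run's first character doubled: alternative, not faster.


-- ===== PORT A =====
-- the 'for i in range(len(text)-1)' loop comparing text[i] with text[i+1], carried out as
-- the same left-to-right walk over adjacent characters with the accumulator new_str
def mumbleALoop (acc : List Char) : List Char → List Char
  | c :: d :: rest => mumbleALoop (if c == d then acc else acc ++ [c, c]) (d :: rest)
  | _ => acc

def mumble_creator (text : String) : String :=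
  let cs := text.toList
  let new_str := mumbleALoop [] cs
  -- text[-1]: last character; none = IndexError on the empty string (excluded by Pre_)
  match cs.getLast? with
  | some c => String.mk (new_str ++ [c, c])
  | none => String.mk new_str

-- ===== PORT B =====
-- the outer while-loop: append text[i]*2, then the inner while-loop skips the rest of the
-- run (the j pointer), i jumps to j — here: dropWhile on the tail
def mumbleBLoop : List Char → List Char
  | [] => []
  | c :: rest => c :: c :: mumbleBLoop (rest.dropWhile (fun d => d == c))
termination_by l => l.length
decreasing_by
  simp only [List.length_cons]
  exact Nat.lt_succ_of_le (List.length_dropWhile_le _ _)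

def mumble_creator_alt (text : String) : String :=
  String.mk (mumbleBLoop text.toList)

-- ===== PRECONDITION & SPEC =====
-- Pre_ excludes only the empty string, on which A raises IndexError (text[-1]).
def Pre_mumble_creator (text : String) : Prop := text ≠ ""
instance (text : String) : Decidable (Pre_mumble_creator text) := by unfold Pre_mumble_creator; infer_instance
def pvWitness_mumble_creator : String := "aabbc"

def Spec_mumble_creator (text : String) (out : String) : Prop := out = mumble_creator_alt text
instance (text : String) (out : String) : Decidable (Spec_mumble_creator text out) := by unfold Spec_mumble_creator; infer_instance

-- ===== CLAIM (what is proved, stated in full; the proofs are below) =====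
def Claim_equal_mumble_creator : Prop := ∀ (text : String), Dom_mumble_creator text → Pre_mumble_creator text → Spec_mumble_creator text (mumble_creator text)

-- ===== LEMMAS AND PROOFS =====

theorem mumbleBLoop_cons (c : Char) (rest : List Char) :
    mumbleBLoop (c :: rest) = c :: c :: mumbleBLoop (rest.dropWhile (fun d => d == c)) := by
  rw [mumbleBLoop.eq_def]

theorem mumbleBLoop_nil : mumbleBLoop [] = [] := by
  rw [mumbleBLoop.eq_def]

-- skipping the whole run at once agrees with stepping past one duplicate
theorem mumbleBLoop_dup (c : Char) (rest : List Char) :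
    mumbleBLoop (c :: c :: rest) = mumbleBLoop (c :: rest) := by
  rw [mumbleBLoop_cons, mumbleBLoop_cons]
  simp [List.dropWhile]

-- main invariant: A's pairwise walk plus the doubled last character = B's run scan
theorem mumble_loop_eq (rest : List Char) : ∀ (c : Char) (acc : List Char),
    mumbleALoop acc (c :: rest) ++ [(c :: rest).getLast (by simp), (c :: rest).getLast (by simp)]
      = acc ++ mumbleBLoop (c :: rest) := by
  induction rest with
  | nil =>
    intro c acc
    rw [mumbleBLoop_cons]
    simp [mumbleALoop, mumbleBLoop_nil]
  | cons d rest' ih =>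
    intro c acc
    by_cases h : c = d
    · subst h
      have := ih c acc
      rw [mumbleBLoop_dup]
      simpa [mumbleALoop, List.getLast] using this
    · have hb : (c == d) = false := by simp [h]
      have hd : (d == c) = false := by simp [Ne.symm h]
      have step : mumbleALoop acc (c :: d :: rest') = mumbleALoop (acc ++ [c, c]) (d :: rest') := by
        simp [mumbleALoop, hb]
      rw [step, mumbleBLoop_cons]
      have := ih d (acc ++ [c, c])
      simp only [List.getLast] at this ⊢
      rw [this, List.dropWhile_cons, if_neg (by simp [hd])]
      simp

-- ===== VERDICT (by name: the statement is the Claim_ definition above) =====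
theorem mumble_creator_spec : Claim_equal_mumble_creator := by
  intro text _ hpre
  unfold Spec_mumble_creator mumble_creator mumble_creator_alt
  have hne : text.toList ≠ [] := by
    intro h
    exact hpre (String.toList_eq_nil_iff.mp h)
  obtain ⟨c, rest, hcs⟩ := List.exists_cons_of_ne_nil hne
  rw [hcs]
  have hl : (c :: rest).getLast? = some ((c :: rest).getLast (by simp)) :=
    List.getLast?_eq_some_getLast (by simp)
  simp only [hl]
  exact congrArg String.mk (mumble_loop_eq rest c [])
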